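-- pv_equiv track=rewrite | github.com/Soumyadeepaul/Code_Workout | Special Sum.py | specialSum
-- ===== SOURCE A (Python) =====
-- def specialSum(arr, n):
-- 	# Write your code here.
-- 	minn=10**9+7
-- 	val1=0
-- 	val2=0
-- 	for i in range(n):
-- 		val1+=arr[i]
-- 		val2+=arr[n-i-1]
-- 		minn=min(minn,val1+val2)
-- 	return minn
-- ===== SOURCE B (Python) =====
-- def specialSum(arr, n):
--     # prefix-sum table: back-running sum expressed as total minus a prefix
--     front = arr[:n]
--     pre = [0]
--     for x in front:
--         pre.append(pre[-1] + x)
--     total = pre[-1]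
--     minn = 10**9 + 7
--     for i in range(n):
--         minn = min(minn, pre[i + 1] + total - pre[n - 1 - i])
--     return minn
-- ===== Notes on version B (the rewrite author's own statement) =====
-- stated objective: alternative
-- what changed: B precomputes one forward prefix-sum table and derives the backward running sum as total minus a prefix, replacing A's two co-accumulated running sums inside the min loop.
import Mathlib
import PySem

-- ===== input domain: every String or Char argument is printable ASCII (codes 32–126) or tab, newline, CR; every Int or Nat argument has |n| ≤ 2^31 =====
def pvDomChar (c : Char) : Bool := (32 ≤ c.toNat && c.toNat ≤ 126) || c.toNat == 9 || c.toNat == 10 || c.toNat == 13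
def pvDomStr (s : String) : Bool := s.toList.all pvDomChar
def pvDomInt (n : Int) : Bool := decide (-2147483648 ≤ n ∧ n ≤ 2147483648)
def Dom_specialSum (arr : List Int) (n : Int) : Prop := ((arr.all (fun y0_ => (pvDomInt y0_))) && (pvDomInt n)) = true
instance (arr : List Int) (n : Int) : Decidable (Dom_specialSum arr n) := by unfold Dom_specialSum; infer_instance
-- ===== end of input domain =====

-- B replaces A's two co-accumulated running sums by one precomputed prefix-sum table,
-- expressing the backward sum as total minus a prefix (alternative decomposition, same cost).

-- ===== PORT A =====
def specialSum (arr : List Int) (n : Int) : Int :=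
  ((PySem.List.pyRange 0 n 1).foldl
    (fun (s : Int × Int × Int) (i : Int) =>
      let val1 := s.2.1 + PySem.List.pyGetD arr i 0
      let val2 := s.2.2 + PySem.List.pyGetD arr (n - i - 1) 0
      (min s.1 (val1 + val2), val1, val2))
    (10 ^ 9 + 7, 0, 0)).1

-- ===== PORT B =====
def specialSum_alt (arr : List Int) (n : Int) : Int :=
  let front := PySem.List.slice arr none (some n)
  let pre := front.foldl (fun (p : List Int) (x : Int) => p ++ [PySem.List.pyGetD p (-1) 0 + x]) [0]
  let total := PySem.List.pyGetD pre (-1) 0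
  (PySem.List.pyRange 0 n 1).foldl
    (fun (m : Int) (i : Int) =>
      min m (PySem.List.pyGetD pre (i + 1) 0 + total - PySem.List.pyGetD pre (n - 1 - i) 0))
    (10 ^ 9 + 7)

-- ===== PRECONDITION & SPEC =====
-- Pre_: A raises IndexError when n exceeds len(arr); exactly those inputs are excluded.
def Pre_specialSum (arr : List Int) (n : Int) : Prop := n ≤ (arr.length : Int)
instance (arr : List Int) (n : Int) : Decidable (Pre_specialSum arr n) := by unfold Pre_specialSum; infer_instance
def pvWitness_specialSum : List Int × Int := ([1, -2, 3], 3)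

def Spec_specialSum (arr : List Int) (n : Int) (out : Int) : Prop := out = specialSum_alt arr n
instance (arr : List Int) (n : Int) (out : Int) : Decidable (Spec_specialSum arr n out) := by unfold Spec_specialSum; infer_instance

-- ===== CLAIM (what is proved, stated in full; the proofs are below) =====
def Claim_equal_specialSum : Prop := ∀ (arr : List Int) (n : Int), Dom_specialSum arr n → Pre_specialSum arr n → Spec_specialSum arr n (specialSum arr n)

-- ===== LEMMAS AND PROOFS =====

/-- sum of the first `k` elements -/
def pref (xs : List Int) (k : Nat) : Int := (xs.take k).sum

/-- the common value of both loops after `m` iterations -/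
def minfold (arr : List Int) (N m : Nat) : Int :=
  (List.range m).foldl
    (fun acc k => min acc (pref arr (k + 1) + pref arr N - pref arr (N - 1 - k))) (10 ^ 9 + 7)

/-- running sums `s+x1, s+x1+x2, …` -/
def partials (s : Int) : List Int → List Int
  | [] => []
  | x :: ys => (s + x) :: partials (s + x) ys

theorem pref_succ (xs : List Int) (k : Nat) (h : k < xs.length) :
    pref xs (k + 1) = pref xs k + xs[k] := by
  simp only [pref]
  exact List.sum_take_succ xs k h

theorem scan_eq (ys : List Int) : ∀ (p : List Int) (s : Int),
    PySem.List.pyGetD p (-1) 0 = s →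
    ys.foldl (fun (q : List Int) (x : Int) => q ++ [PySem.List.pyGetD q (-1) 0 + x]) p
      = p ++ partials s ys := by
  induction ys with
  | nil => intro p s _; simp [partials]
  | cons x ys ih =>
    intro p s hp
    simp only [List.foldl_cons, hp]
    rw [ih (p ++ [s + x]) (s + x) (PySem.List.pyGetD_neg_one_append_singleton p (s + x) 0)]
    simp [partials]

theorem partials_last (ys : List Int) : ∀ (p : List Int) (s : Int),
    PySem.List.pyGetD p (-1) 0 = s →
    PySem.List.pyGetD (p ++ partials s ys) (-1) 0 = s + ys.sum := by
  induction ys with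
  | nil => intro p s hp; simpa [partials] using hp
  | cons x ys ih =>
    intro p s hp
    have := ih (p ++ [s + x]) (s + x) (PySem.List.pyGetD_neg_one_append_singleton p (s + x) 0)
    simp only [partials, List.append_assoc, List.singleton_append] at this ⊢
    rw [this, List.sum_cons]; ring

theorem partials_get (ys : List Int) : ∀ (s : Int) (k : Nat), k < ys.length →
    (partials s ys)[k]? = some (s + pref ys (k + 1)) := by
  induction ys with
  | nil => intro s k hk; simp at hk
  | cons x ys ih =>
    intro s k hk
    cases k with
    | zero => simp [partials, pref]
    | succ k =>
      simp only [partials, List.getElem?_cons_succ]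
      rw [ih (s + x) k (by simpa using hk)]
      simp [pref, List.take_succ_cons]
      ring

theorem A_loop (arr : List Int) (N : Nat) (hlen : N ≤ arr.length) :
    ∀ m, m ≤ N →
    ((List.range m).foldl
      (fun (s : Int × Int × Int) (k : Nat) =>
        (min s.1 ((s.2.1 + PySem.List.pyGetD arr (k : Int) 0) +
                  (s.2.2 + PySem.List.pyGetD arr ((N : Int) - (k : Int) - 1) 0)),
         s.2.1 + PySem.List.pyGetD arr (k : Int) 0,
         s.2.2 + PySem.List.pyGetD arr ((N : Int) - (k : Int) - 1) 0))
      (10 ^ 9 + 7, 0, 0))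
    = (minfold arr N m, pref arr m, pref arr N - pref arr (N - m)) := by
  intro m hm
  induction m with
  | zero => simp [minfold, pref]
  | succ m ih =>
    have hmN : m < N := hm
    have ihm := ih (Nat.le_of_lt hmN)
    rw [List.range_succ, List.foldl_append, ihm]
    have h1 : PySem.List.pyGetD arr (m : Int) 0 = arr[m]'(Nat.lt_of_lt_of_le hmN hlen) := by
      rw [PySem.List.pyGetD_natCast]
      exact List.getD_eq_getElem arr 0 _
    have hidx : (N : Int) - (m : Int) - 1 = ((N - 1 - m : Nat) : Int) := by omega
    have hb : N - 1 - m < arr.length := by omega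
    have h2 : PySem.List.pyGetD arr ((N : Int) - (m : Int) - 1) 0 = arr[N - 1 - m] := by
      rw [hidx, PySem.List.pyGetD_natCast]
      exact List.getD_eq_getElem arr 0 _
    have hp1 : pref arr (m + 1) = pref arr m + arr[m]'(Nat.lt_of_lt_of_le hmN hlen) :=
      pref_succ arr m (Nat.lt_of_lt_of_le hmN hlen)
    have hp2 : pref arr (N - m) = pref arr (N - 1 - m) + arr[N - 1 - m] := by
      have : N - m = (N - 1 - m) + 1 := by omega
      rw [this, pref_succ arr _ hb]
    have hmf : minfold arr N (m + 1)
        = min (minfold arr N m) (pref arr (m + 1) + pref arr N - pref arr (N - 1 - m)) := by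
      simp [minfold, List.range_succ]
    simp only [List.foldl_cons, List.foldl_nil, h1, h2]
    rw [hmf]
    refine Prod.ext ?_ (Prod.ext ?_ ?_) <;> simp [hp1]
    · congr 1; rw [hp2]; ring
    · have e : N - (m + 1) = N - 1 - m := by omega
      rw [e, hp2]; ring

-- ===== VERDICT (by name: the statement is the Claim_ definition above) =====
theorem specialSum_spec : Claim_equal_specialSum := by
  intro arr n _ hpre
  unfold Spec_specialSum specialSum specialSum_alt
  rcases (by omega : n ≤ 0 ∨ 0 < n) with hn | hn
  · have : n.toNat = 0 := Int.toNat_of_nonpos hn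
    simp [PySem.List.pyRange_one, this]
  · -- n = (N : Int), 0 < N ≤ arr.length
    obtain ⟨N, rfl⟩ : ∃ N : Nat, n = (N : Nat) := ⟨n.toNat, (Int.toNat_of_nonneg hn.le).symm⟩
    have hlen : N ≤ arr.length := by unfold Pre_specialSum at hpre; exact_mod_cast hpre
    -- characterize B's pre list
    have hfront : PySem.List.slice arr none (some (N : Int)) = arr.take N := by
      exact PySem.List.slice_to_natCast arr N
    have hFlen : (arr.take N).length = N := by simp [hlen]
    have hzero : PySem.List.pyGetD ([0] : List Int) (-1) 0 = 0 := by decide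
    have hpre0 : (arr.take N).foldl
        (fun (q : List Int) (x : Int) => q ++ [PySem.List.pyGetD q (-1) 0 + x]) [0]
        = [0] ++ partials 0 (arr.take N) := scan_eq (arr.take N) [0] 0 hzero
    have hprefF : ∀ j, j ≤ N → pref (arr.take N) j = pref arr j := by
      intro j hj
      simp [pref, List.take_take, Nat.min_eq_left hj]
    have htotal : PySem.List.pyGetD ([0] ++ partials 0 (arr.take N)) (-1) 0 = pref arr N := by
      rw [partials_last (arr.take N) [0] 0 hzero]
      have : (arr.take N).sum = pref arr N := by
        rw [← hprefF N le_rfl]; simp [pref, List.take_take]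
      omega
    have hget : ∀ j : Nat, j ≤ N →
        PySem.List.pyGetD ([0] ++ partials 0 (arr.take N)) ((j : Nat) : Int) 0 = pref arr j := by
      intro j hj
      rw [PySem.List.pyGetD_natCast]
      cases j with
      | zero => simp [pref]
      | succ k =>
        have hk : k < (arr.take N).length := by omega
        have := partials_get (arr.take N) 0 k hk
        simp only [List.singleton_append, List.getD, List.getElem?_cons_succ]
        rw [this]
        simp [hprefF (k + 1) hj]
    simp only [hfront, hpre0, htotal]
    have hr : PySem.List.pyRange 0 (N : Int) 1 = (List.range N).map (fun k : Nat => (k : Int)) := by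
      rw [PySem.List.pyRange_one]; simp
    rw [hr]
    simp only [List.foldl_map]
    rw [A_loop arr N hlen N le_rfl]
    show minfold arr N N = _
    refine Eq.symm ?_
    unfold minfold
    refine PySem.List.foldl_congr_mem _ _ _ _ ?_
    intro acc k hk
    have hkN : k < N := List.mem_range.mp hk
    have e1 : ((k : Int) + 1) = ((k + 1 : Nat) : Int) := by push_cast; ring
    have e2 : ((N : Int) - 1 - (k : Int)) = ((N - 1 - k : Nat) : Int) := by omega
    rw [e1, e2, hget (k + 1) (by omega), hget (N - 1 - k) (by omega)]
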